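-- pv_equiv track=rewrite | github.com/sara-k03/competitive-programming | PerfectPowers/perfectpowers.py | pth_power
-- ===== SOURCE A (Python) =====
-- from math import log2
--
-- def int_root(n, a): # function for taking a-th roots
--     low = 1
--     high = n
--     while low <= high:
--         mid = (low + high) // 2
--         power = mid ** a
--         if power == n:
--             return mid
--         elif power < n:
--             low = mid + 1
--         else:
--             high = mid - 1
--     return -1
--
-- def pth_power(n):
--     if n == 1:
--         return 1
--     if n == -1:
--         return 1
--     is_negative = n < 0
--     abs_n = abs(n)
--     max_a = int(log2(abs_n)) + 1
--     if is_negative: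
--         if max_a % 2 != 0:
--             start_a = max_a
--         else:
--             start_a = max_a - 1
--         for a in range(start_a, 1, -2):
--             x = int_root(abs_n, a)
--             if x != -1 and ((-x) ** a == n):
--                 return a
--     else:
--         for a in range(max_a, 1, -1):
--             x = int_root(abs_n, a)
--             if x != -1:
--                 return a
--     return 1
-- ===== SOURCE B (Python) =====
-- def pth_power(n):
--     # Ascending smallest-base search: the smallest base b >= 2 with b**k == abs(n)
--     # carries the LARGEST exponent k; for negative n the answer is the largest odd
--     # divisor of that k. (Return value only; no mutation.)
--     m = abs(n)
--     g = 1
--     b = 2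
--     while b * b <= m:
--         p = b
--         k = 1
--         while p < m:
--             p *= b
--             k += 1
--         if p == m:
--             g = k
--             break
--         b += 1
--     if n < 0:
--         while g % 2 == 0:
--             g //= 2
--     return g
-- ===== Notes on version B (the rewrite author's own statement) =====
-- stated objective: alternative
-- what changed: A tries exponents downward from log2(|n|), binary-searching an integer root for each (with a separate odd-stepped loop for negative n); B instead scans bases upward and returns the exponent of the smallest base whose power ladder hits |n| (the smallest base carries the largest exponent), stripping factors of 2 from that exponent when n is negative.
-- outside the precondition, e.g. on pth_power(0): A raises ValueError, B returns 1
import Mathlib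
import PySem

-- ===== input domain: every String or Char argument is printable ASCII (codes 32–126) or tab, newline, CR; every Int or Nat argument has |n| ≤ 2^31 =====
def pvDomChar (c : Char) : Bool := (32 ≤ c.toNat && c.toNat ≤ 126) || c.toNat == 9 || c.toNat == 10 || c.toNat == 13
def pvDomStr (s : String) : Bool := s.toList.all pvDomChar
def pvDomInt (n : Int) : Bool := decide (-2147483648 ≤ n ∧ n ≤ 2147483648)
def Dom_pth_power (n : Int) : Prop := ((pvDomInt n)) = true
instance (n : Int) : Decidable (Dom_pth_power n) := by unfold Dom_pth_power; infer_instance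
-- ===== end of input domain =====

-- B replaces A's descending-exponent loop with binary-search roots by a single
-- ascending smallest-base search (the smallest base carries the largest exponent),
-- stripping factors of 2 from the exponent for negative inputs; objective: alternative.

-- ===== PORT A =====
-- while low <= high of int_root (binary search for an a-th root of n in [low, high])
def intRootLoop (n a low high : Int) : Int :=
  if _h : low ≤ high then
    let mid := PySem.Int.floordiv (low + high) 2
    let power := mid ^ a.toNat   -- mid ** a; a ≥ 2 at every call site
    if power = n then mid
    else if power < n then intRootLoop n a (mid + 1) high
    else intRootLoop n a low (mid - 1)
  else -1
termination_by (high + 1 - low).toNat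
decreasing_by
  all_goals
    have hb := PySem.Int.floordiv_two_mid_bounds _h
    omega

def int_root (n a : Int) : Int := intRootLoop n a 1 n

-- for a in range(max_a, 1, -1): counts a down from max_a while a ≥ 2
def loopPos (abs_n a : Int) : Int :=
  if 2 ≤ a then
    let x := int_root abs_n a
    if x ≠ -1 then a else loopPos abs_n (a - 1)
  else 1
termination_by a.toNat
decreasing_by omega

-- for a in range(start_a, 1, -2): counts a down by 2 (start_a is odd, so a ≥ 2 ↔ a ≥ 3)
def loopNeg (n abs_n a : Int) : Int :=
  if 2 ≤ a then
    let x := int_root abs_n a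
    if x ≠ -1 ∧ (-x) ^ a.toNat = n then a else loopNeg n abs_n (a - 2)
  else 1
termination_by a.toNat
decreasing_by omega

def pth_power (n : Int) : Int :=
  if n = 1 then 1
  else if n = -1 then 1
  else
    let abs_n := |n|
    -- int(log2(abs_n)) + 1: exact as Nat.log 2 for 1 ≤ |n| ≤ 2^31 (the double cannot round up to the next integer there)
    let max_a : Int := (Nat.log 2 abs_n.toNat : Int) + 1
    if n < 0 then
      let start_a := if PySem.Int.mod max_a 2 ≠ 0 then max_a else max_a - 1
      loopNeg n abs_n start_a
    else
      loopPos abs_n max_a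

-- ===== PORT B =====
-- inner while p < m: p *= b; k += 1   (the '2 ≤ b ∧ 1 ≤ p' test is only a termination guard;
-- it holds at every call B makes)
def powUp (m b p k : Int) : Int × Int :=
  if 2 ≤ b ∧ 1 ≤ p then
    if p < m then powUp m b (p * b) (k + 1) else (p, k)
  else (p, k)
termination_by (m - p).toNat
decreasing_by
  have h2 : p * 2 ≤ p * b := by
    have := mul_le_mul_of_nonneg_left (by omega : (2:Int) ≤ b) (by omega : (0:Int) ≤ p)
    linarith
  omega

-- outer while b * b <= m, breaking with g = k on the first base whose power ladder hits m
def findBase (m b : Int) : Int :=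
  if _h : b * b ≤ m then
    let pk := powUp m b b 1
    if pk.1 = m then pk.2 else findBase m (b + 1)
  else 1
termination_by (m + 1 - b).toNat
decreasing_by
  have hbm : b ≤ m := by
    by_cases h0 : b ≤ 0
    · nlinarith
    · nlinarith
  omega

-- while g % 2 == 0: g //= 2   ('1 ≤ g' is only a termination guard; findBase returns g ≥ 1)
def oddPart (g : Int) : Int :=
  if PySem.Int.mod g 2 = 0 ∧ 1 ≤ g then oddPart (PySem.Int.floordiv g 2)
  else g
termination_by g.toNat
decreasing_by
  have h1 := PySem.Int.floordiv_eq_ediv_of_pos (a := g) (by omega : (0:Int) < 2)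
  omega

def pth_power_alt (n : Int) : Int :=
  let m := |n|
  let g := findBase m 2
  if n < 0 then oddPart g else g

-- ===== PRECONDITION & SPEC =====
-- Pre_ excludes only n = 0, where A raises ValueError (log2 math-domain error).
def Pre_pth_power (n : Int) : Prop := n ≠ 0
instance (n : Int) : Decidable (Pre_pth_power n) := by unfold Pre_pth_power; infer_instance
def pvWitness_pth_power : Int := 64

def Spec_pth_power (n : Int) (out : Int) : Prop := out = pth_power_alt n
instance (n : Int) (out : Int) : Decidable (Spec_pth_power n out) := by unfold Spec_pth_power; infer_instance

-- ===== CLAIM (what is proved, stated in full; the proofs are below) =====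
def Claim_equal_pth_power : Prop := ∀ (n : Int), Dom_pth_power n → Pre_pth_power n → Spec_pth_power n (pth_power n)

-- ===== LEMMAS AND PROOFS =====

def RootP (m : Int) (k : ℕ) : Prop := ∃ x : Int, 1 ≤ x ∧ x ^ k = m

def BaseP (m b : Int) : Prop := 2 ≤ b ∧ b * b ≤ m ∧ ∃ j : ℕ, 1 ≤ j ∧ b ^ j = m

theorem intRootLoop_finds (n a : Int) (ha : a.toNat ≠ 0) (low high : Int) (hlow : 1 ≤ low)
    (x : Int) (hx1 : low ≤ x) (hx2 : x ≤ high) (hx : x ^ a.toNat = n) :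
    intRootLoop n a low high = x := by
  fun_induction intRootLoop n a low high with
  | case1 low high h mid power heq =>
    -- power = n
    have hb := PySem.Int.floordiv_two_mid_bounds h
    rcases lt_trichotomy mid x with hlt | heq2 | hgt
    · exfalso
      have : mid ^ a.toNat < x ^ a.toNat := pow_lt_pow_left₀ hlt (by omega) ha
      omega
    · simpa using heq2
    · exfalso
      have : x ^ a.toNat < mid ^ a.toNat := pow_lt_pow_left₀ hgt (by omega) ha
      omega
  | case2 low high h mid power heq hlt ih =>
    -- power < n, recurse on [mid+1, high]
    have hb := PySem.Int.floordiv_two_mid_bounds h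
    refine ih ?_ ?_ hx2
    · omega
    · by_contra hcon
      have hxm : x ≤ mid := by omega
      have : x ^ a.toNat ≤ mid ^ a.toNat := pow_le_pow_left₀ (by omega) hxm _
      omega
  | case3 low high h mid power heq hlt ih =>
    -- power > n, recurse on [low, mid-1]
    have hb := PySem.Int.floordiv_two_mid_bounds h
    refine ih hlow hx1 ?_
    by_contra hcon
    have hxm : mid ≤ x := by omega
    have : mid ^ a.toNat ≤ x ^ a.toNat := pow_le_pow_left₀ (by omega) hxm _
    omega
  | case4 low high h => omega

theorem intRootLoop_none (n a : Int) (low high : Int)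
    (hno : ∀ x : Int, low ≤ x → x ≤ high → x ^ a.toNat ≠ n) :
    intRootLoop n a low high = -1 := by
  fun_induction intRootLoop n a low high with
  | case1 low high h mid power heq =>
    have hb := PySem.Int.floordiv_two_mid_bounds h
    exact absurd heq (hno mid (by omega) (by omega))
  | case2 low high h mid power heq hlt ih =>
    have hb := PySem.Int.floordiv_two_mid_bounds h
    exact ih fun x h1 h2 => hno x (by omega) h2
  | case3 low high h mid power heq hlt ih =>
    have hb := PySem.Int.floordiv_two_mid_bounds h
    exact ih fun x h1 h2 => hno x h1 (by omega)
  | case4 low high h => rfl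

theorem int_root_finds (n a : Int) (ha : a.toNat ≠ 0) (x : Int) (hx1 : 1 ≤ x)
    (hx : x ^ a.toNat = n) : int_root n a = x := by
  have hxn : x ≤ n := hx ▸ le_self_pow₀ hx1 ha
  exact intRootLoop_finds n a ha 1 n le_rfl x hx1 hxn hx

theorem int_root_none (n a : Int) (hno : ¬ RootP n a.toNat) :
    int_root n a = -1 := by
  refine intRootLoop_none n a 1 n fun x h1 _ hxn => hno ⟨x, h1, hxn⟩

-- roots of m ≥ 2 are ≥ 2, and any root with exponent ≥ 2 is a base candidate
theorem rootP_base {m : Int} (hm : 2 ≤ m) {k : ℕ} (hk : 2 ≤ k) (hr : RootP m k) :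
    ∃ x : Int, 2 ≤ x ∧ x * x ≤ m ∧ x ^ k = m := by
  obtain ⟨x, hx1, hxk⟩ := hr
  have hx2 : 2 ≤ x := by
    rcases eq_or_lt_of_le hx1 with h1 | h1
    · exfalso; rw [← h1] at hxk; simp at hxk; omega
    · omega
  refine ⟨x, hx2, ?_, hxk⟩
  calc x * x = x ^ 2 := by ring
  _ ≤ x ^ k := pow_le_pow_right₀ (by omega) hk
  _ = m := hxk

theorem loopPos_none (m : Int) (_hm : 2 ≤ m) (s : Int)
    (hno : ∀ a : Int, 2 ≤ a → a ≤ s → ¬ RootP m a.toNat) :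
    loopPos m s = 1 := by
  fun_induction loopPos m s with
  | case1 s h x hcond =>
    exact absurd (int_root_none m s (hno s h le_rfl)) hcond
  | case2 s h x hcond ih =>
    exact ih fun a h2 hs => hno a h2 (by omega)
  | case3 s h => rfl

theorem loopPos_finds (m : Int) (_hm : 2 ≤ m) (s a0 : Int) (ha0 : 2 ≤ a0) (ha0s : a0 ≤ s)
    (hr : RootP m a0.toNat)
    (hab : ∀ a : Int, a0 < a → a ≤ s → ¬ RootP m a.toNat) :
    loopPos m s = a0 := by
  fun_induction loopPos m s with
  | case1 s h x hcond =>
    by_contra hne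
    have hlt : a0 < s := by omega
    exact hcond (int_root_none m s (hab s hlt le_rfl))
  | case2 s h x hcond ih =>
    have hs : ¬ RootP m s.toNat := by
      intro hrs
      obtain ⟨r, hr1, hrk⟩ := hrs
      have hx : x = r := int_root_finds m s (by omega) r hr1 hrk
      exact hcond (by rw [hx]; omega)
    have hne : a0 ≠ s := fun he => hs (he ▸ hr)
    exact ih (by omega) fun a h1 h2 => hab a h1 (by omega)
  | case3 s h => omega

theorem odd_toNat {s : Int} (hs : 2 ≤ s) (h : Odd s) : Odd s.toNat := by
  rcases h with ⟨j, hj⟩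
  exact ⟨j.toNat, by omega⟩

theorem loopNeg_none (n m : Int) (_hm : 2 ≤ m) (s : Int) (hso : Odd s)
    (hno : ∀ a : Int, 2 ≤ a → a ≤ s → Odd a → ¬ RootP m a.toNat) :
    loopNeg n m s = 1 := by
  fun_induction loopNeg n m s with
  | case1 s h x hcond =>
    exact absurd (int_root_none m s (hno s h le_rfl hso)) hcond.1
  | case2 s h x hcond ih =>
    have hso2 : Odd (s - 2) := by rcases hso with ⟨j, hj⟩; exact ⟨j - 1, by omega⟩
    exact ih hso2 fun a h2 hs ho => hno a h2 (by omega) ho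
  | case3 s h => rfl

theorem loopNeg_finds (n m : Int) (_hm : 2 ≤ m) (hn : n = -m) (s : Int) (hso : Odd s)
    (a0 : Int) (hao : Odd a0) (ha0 : 2 ≤ a0) (ha0s : a0 ≤ s) (hr : RootP m a0.toNat)
    (hab : ∀ a : Int, a0 < a → a ≤ s → Odd a → ¬ RootP m a.toNat) :
    loopNeg n m s = a0 := by
  fun_induction loopNeg n m s with
  | case1 s h x hcond =>
    by_contra hne
    have hlt : a0 < s := by omega
    exact hcond.1 (int_root_none m s (hab s hlt le_rfl hso))
  | case2 s h x hcond ih =>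
    have hs : ¬ RootP m s.toNat := by
      intro hrs
      obtain ⟨r, hr1, hrk⟩ := hrs
      have hx : x = r := int_root_finds m s (by omega) r hr1 hrk
      refine hcond ⟨by omega, ?_⟩
      rw [hx, (odd_toNat h hso).neg_pow, hrk, hn]
    have hne : a0 ≠ s := fun he => hs (he ▸ hr)
    have hso2 : Odd (s - 2) := by rcases hso with ⟨j, hj⟩; exact ⟨j - 1, by omega⟩
    have ha0s2 : a0 ≤ s - 2 := by
      rcases hso with ⟨j, hj⟩; rcases hao with ⟨i, hi⟩; omega
    exact ih hso2 ha0s2 fun a h1 h2 ho => hab a h1 (by omega) ho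
  | case3 s h => omega

theorem powUp_spec (m b : Int) (hb : 2 ≤ b) (p k : Int) (hp : 1 ≤ p) :
    ∃ K : ℕ, powUp m b p k = (p * b ^ K, k + K) ∧ m ≤ p * b ^ K ∧
      ∀ j : ℕ, j < K → p * b ^ j < m := by
  fun_induction powUp m b p k with
  | case1 p k hg hlt ih =>
    have hp2 : 1 ≤ p * b := by nlinarith
    obtain ⟨K, h1, h2, h3⟩ := ih hp2
    refine ⟨K + 1, ?_, ?_, ?_⟩
    · rw [h1]
      simp only [Prod.mk.injEq]
      constructor
      · ring
      · push_cast; ring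
    · calc m ≤ p * b * b ^ K := h2
      _ = p * b ^ (K + 1) := by ring
    · intro j hj
      cases j with
      | zero => simpa using hlt
      | succ i =>
        have := h3 i (by omega)
        calc p * b ^ (i + 1) = p * b * b ^ i := by ring
        _ < m := this
  | case2 p k hg hge =>
    exact ⟨0, by simp, by simp; omega, fun j hj => by omega⟩
  | case3 p k hg =>
    exact absurd ⟨hb, hp⟩ hg

-- ladder outcome for one base b
theorem powUp_hit (m b : Int) (hb : 2 ≤ b) :
    ∃ K : ℕ, powUp m b b 1 = (b ^ (K + 1), (1:Int) + K) ∧ m ≤ b ^ (K + 1) ∧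
      ∀ i : ℕ, 1 ≤ i → i ≤ K → b ^ i < m := by
  obtain ⟨K, h1, h2, h3⟩ := powUp_spec m b hb b 1 (by omega)
  have hbK : b * b ^ K = b ^ (K + 1) := by ring
  refine ⟨K, by rw [h1, hbK], by rw [← hbK]; exact h2, ?_⟩
  intro i hi1 hiK
  have := h3 (i - 1) (by omega)
  calc b ^ i = b * b ^ (i - 1) := by
        rw [← pow_succ']
        congr 1
        omega
  _ < m := this

theorem powUp_miss (m b : Int) (hb : 2 ≤ b) (hmiss : (powUp m b b 1).1 ≠ m) :
    ¬ ∃ j : ℕ, 1 ≤ j ∧ b ^ j = m := by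
  obtain ⟨K, h1, h2, h3⟩ := powUp_hit m b hb
  intro ⟨j, hj1, hjm⟩
  have hm' : (powUp m b b 1).1 = b ^ (K + 1) := by rw [h1]
  rw [hm'] at hmiss
  by_cases hjK : j ≤ K
  · exact absurd hjm (by have := h3 j hj1 hjK; omega)
  · have : b ^ (K + 1) ≤ b ^ j := pow_le_pow_right₀ (by omega) (by omega)
    omega

theorem findBase_none (m : Int) (b : Int) (hb : 2 ≤ b)
    (hno : ∀ c : Int, b ≤ c → ¬ BaseP m c) : findBase m b = 1 := by
  fun_induction findBase m b with
  | case1 b h pk hhit =>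
    obtain ⟨K, h1, h2, h3⟩ := powUp_hit m b hb
    have hhit' : (powUp m b b 1).1 = m := hhit
    rw [h1] at hhit'
    exact absurd ⟨hb, h, K + 1, by omega, hhit'⟩ (hno b le_rfl)
  | case2 b h pk hmiss ih =>
    exact ih (by omega) fun c hc => hno c (by omega)
  | case3 b h => rfl

theorem findBase_finds (m : Int) (b : Int) (hb : 2 ≤ b) (b0 : Int) (hP : BaseP m b0)
    (hbb0 : b ≤ b0) (hmin : ∀ c : Int, b ≤ c → c < b0 → ¬ BaseP m c) :
    ∃ k : ℕ, 1 ≤ k ∧ b0 ^ k = m ∧ findBase m b = (k : Int) := by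
  fun_induction findBase m b with
  | case1 b h pk hhit =>
    obtain ⟨K, h1, h2, h3⟩ := powUp_hit m b hb
    have hhit' : (powUp m b b 1).1 = m := hhit
    rw [h1] at hhit'
    have hbeq : b = b0 := by
      by_contra hne
      exact hmin b le_rfl (by omega) ⟨hb, h, K + 1, by omega, hhit'⟩
    subst hbeq
    refine ⟨K + 1, by omega, hhit', ?_⟩
    have hpk : pk = (b ^ (K + 1), (1:Int) + K) := h1
    rw [hpk]
    push_cast
    ring
  | case2 b h pk hmiss ih =>
    have hne : b ≠ b0 := by
      intro he
      obtain ⟨_, _, j, hj1, hjm⟩ := hP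
      exact powUp_miss m b hb hmiss ⟨j, hj1, by rw [he]; exact hjm⟩
    exact ih (by omega) (by omega) fun c h1 h2 => hmin c (by omega) h2
  | case3 b h =>
    exfalso
    obtain ⟨hb02, hb0m, _⟩ := hP
    have : b * b ≤ b0 * b0 := by nlinarith
    omega

theorem oddPart_spec (g : Int) (hg : 1 ≤ g) :
    1 ≤ oddPart g ∧ Odd (oddPart g) ∧ oddPart g ∣ g ∧
      ∀ d : Int, Odd d → d ∣ g → d ∣ oddPart g := by
  fun_induction oddPart g with
  | case1 g hcond ih =>
    obtain ⟨heven, hg1⟩ := hcond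
    rw [PySem.Int.mod_eq_emod_of_pos (by omega)] at heven
    have hfd : PySem.Int.floordiv g 2 = g / 2 :=
      PySem.Int.floordiv_eq_ediv_of_pos (by omega)
    have hgh : g = 2 * (g / 2) := by omega
    have hh1 : 1 ≤ PySem.Int.floordiv g 2 := by omega
    obtain ⟨ih1, ih2, ih3, ih4⟩ := ih hh1
    refine ⟨ih1, ih2, ?_, ?_⟩
    · rw [hfd] at ih3 ⊢
      exact ih3.trans ⟨2, by omega⟩
    · intro d hd hdg
      refine ih4 d hd ?_
      rw [hfd]
      have h2 : ¬ ((2:Int) ∣ d) := by rcases hd with ⟨j, hj⟩; omega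
      have hc : IsCoprime (2:Int) d := (Int.prime_two.coprime_iff_not_dvd).mpr h2
      exact hc.symm.dvd_of_dvd_mul_left (by rwa [← hgh])
  | case2 g hcond =>
    by_cases hg1 : 1 ≤ g
    · have hodd : Odd g := by
        have hmod := PySem.Int.mod_eq_emod_of_pos (a := g) (by omega : (0:Int) < 2)
        have : ¬ PySem.Int.mod g 2 = 0 := fun h => hcond ⟨h, hg1⟩
        rw [hmod] at this
        exact ⟨g / 2, by omega⟩
      exact ⟨hg1, hodd, dvd_refl g, fun d _ hdg => hdg⟩
    · omega

-- every exponent of a perfect-power representation divides the maximal one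
theorem nat_exp_dvd (M g a x y : ℕ) (_hM : 2 ≤ M) (hg : 1 ≤ g) (ha : 1 ≤ a)
    (hxg : x ^ g = M) (hya : y ^ a = M)
    (hmax : ∀ (c b : ℕ), 1 ≤ b → c ^ b = M → b ≤ g) : a ∣ g := by
  obtain ⟨c, hxc, hyc⟩ :=
    Nat.exists_eq_pow_of_pow_eq_pow (m := g) (n := a) (Or.inl (by omega)) (hxg.trans hya.symm)
  set d := Nat.gcd g a with hd
  have had : d ∣ a := Nat.gcd_dvd_right g a
  have hd1 : 1 ≤ d := Nat.gcd_pos_of_pos_left a (by omega)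
  have h1 : 1 ≤ a / d := Nat.div_pos (Nat.le_of_dvd (by omega) had) (by omega)
  have hM' : c ^ (a / d * g) = M := by
    rw [pow_mul, ← hxc, hxg]
  have hb := hmax c (a / d * g) (Nat.mul_pos (by omega) (by omega)) hM'
  have had1 : a / d = 1 := by
    by_contra hne
    have h2 : 2 ≤ a / d := by omega
    nlinarith
  have h5 := Nat.mul_div_cancel' had
  rw [had1, mul_one] at h5
  rw [← h5, hd]
  exact Nat.gcd_dvd_left g a

theorem max_exponent {m b0 : Int} (hm : 2 ≤ m) (hP : BaseP m b0)
    (hmin : ∀ c : Int, 2 ≤ c → c < b0 → ¬ BaseP m c)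
    (k : ℕ) (hk : 1 ≤ k) (hb0k : b0 ^ k = m) :
    ∀ (c : Int) (b : ℕ), 1 ≤ c → 1 ≤ b → c ^ b = m → b ≤ k := by
  intro c b hc hb hcb
  by_contra hgt
  have hc2 : 2 ≤ c := by
    rcases eq_or_lt_of_le hc with h1 | h1
    · exfalso; rw [← h1] at hcb; simp at hcb; omega
    · omega
  have hb2 : 2 ≤ b := by omega
  have hcc : c * c ≤ m := by
    calc c * c = c ^ 2 := by ring
    _ ≤ c ^ b := pow_le_pow_right₀ (by omega) hb2
    _ = m := hcb
  have hP2 : BaseP m c := ⟨hc2, hcc, b, hb, hcb⟩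
  have hcb0 : ¬ c < b0 := fun h => hmin c hc2 h hP2
  have hb02 : 2 ≤ b0 := hP.1
  have h1 : b0 ^ b ≤ c ^ b := pow_le_pow_left₀ (by omega) (by omega) b
  have h2 : b0 ^ k < b0 ^ b := pow_lt_pow_right₀ (by omega) (by omega)
  omega

-- the same maximality premise, in ℕ
theorem max_exponent_nat {m b0 : Int} (hm : 2 ≤ m) (hP : BaseP m b0)
    (hmin : ∀ c : Int, 2 ≤ c → c < b0 → ¬ BaseP m c)
    (k : ℕ) (hk : 1 ≤ k) (hb0k : b0 ^ k = m) :
    ∀ (c b : ℕ), 1 ≤ b → c ^ b = m.toNat → b ≤ k := by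
  intro c b hb hcb
  have hc : 1 ≤ c := by
    by_contra h
    have : c = 0 := by omega
    rw [this] at hcb
    rw [Nat.zero_pow (by omega : 0 < b)] at hcb
    omega
  refine max_exponent hm hP hmin k hk hb0k (c : Int) b (by exact_mod_cast hc) hb ?_
  have h6 : ((c ^ b : ℕ) : Int) = ((m.toNat : ℕ) : Int) := congrArg (Nat.cast : ℕ → ℤ) hcb
  push_cast at h6
  rw [h6]
  omega

-- an Int root yields a ℕ root of m.toNat
theorem rootP_toNat {m : Int} (hm : 2 ≤ m) {k : ℕ} (h : RootP m k) :
    ∃ X : ℕ, 1 ≤ X ∧ X ^ k = m.toNat := by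
  obtain ⟨x, hx1, hxk⟩ := h
  refine ⟨x.toNat, by omega, ?_⟩
  have hx : ((x.toNat : ℕ) : Int) = x := by omega
  have : ((x.toNat ^ k : ℕ) : Int) = m := by push_cast [hx]; exact hxk
  omega

-- if a base exists, a smallest one exists
theorem exists_min_base {m : Int} (hex : ∃ b : Int, BaseP m b) :
    ∃ b0 : Int, BaseP m b0 ∧ ∀ c : Int, 2 ≤ c → c < b0 → ¬ BaseP m c := by
  classical
  obtain ⟨b, hb⟩ := hex
  have hexN : ∃ c : ℕ, BaseP m (c : Int) := ⟨b.toNat, by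
    have : ((b.toNat : ℕ) : Int) = b := by have := hb.1; omega
    rwa [this]⟩
  refine ⟨(Nat.find hexN : Int), Nat.find_spec hexN, ?_⟩
  intro c hc2 hclt hcP
  have hcn : ((c.toNat : ℕ) : Int) = c := by omega
  have := Nat.find_le (h := hexN) (p := fun u : ℕ => BaseP m (u : Int)) (n := c.toNat) (by simp only []; rwa [hcn])
  omega

-- positive case: A's descending loop equals B's smallest-base search
theorem pos_case {m : Int} (hm : 2 ≤ m) :
    loopPos m ((Nat.log 2 m.toNat : Int) + 1) = findBase m 2 := by
  by_cases hex : ∃ b : Int, BaseP m b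
  · obtain ⟨b0, hP, hmin⟩ := exists_min_base hex
    obtain ⟨k, hk1, hb0k, hfb⟩ := findBase_finds m 2 le_rfl b0 hP hP.1
      (fun c h1 h2 => hmin c h1 h2)
    have hk2 : 2 ≤ k := by
      by_contra h
      have hk1' : k = 1 := by omega
      rw [hk1'] at hb0k
      simp at hb0k
      obtain ⟨hb02, hbb, _⟩ := hP
      nlinarith
    have hklog : k ≤ Nat.log 2 m.toNat := by
      have h2k : (2:Int) ^ k ≤ m := by
        calc (2:Int) ^ k ≤ b0 ^ k := pow_le_pow_left₀ (by omega) hP.1 k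
        _ = m := hb0k
      have h2kN : 2 ^ k ≤ m.toNat := by
        have : ((2 ^ k : ℕ) : Int) ≤ m := by push_cast; exact h2k
        omega
      exact (Nat.le_log_iff_pow_le (by omega) (by omega)).mpr h2kN
    rw [hfb]
    refine loopPos_finds m hm _ (k : Int) (by exact_mod_cast hk2) (by omega) ⟨b0, by have := hP.1; omega, by simpa using hb0k⟩ ?_
    intro a hlt hle hr
    obtain ⟨x, hx1, hxk⟩ := hr
    have := max_exponent hm hP hmin k hk1 hb0k x a.toNat hx1 (by omega) hxk
    omega
  · rw [findBase_none m 2 le_rfl fun c _ hc => hex ⟨c, hc⟩]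
    refine loopPos_none m hm _ ?_
    intro a h2 hs hr
    obtain ⟨x, hx2, hxx, hxk⟩ := rootP_base hm (k := a.toNat) (by omega) hr
    exact hex ⟨x, hx2, hxx, a.toNat, by omega, hxk⟩

theorem oddPart_one : oddPart 1 = 1 := by
  rw [oddPart]
  rw [if_neg]
  intro ⟨h1, _⟩
  rw [PySem.Int.mod_eq_emod_of_pos (by omega)] at h1
  omega

-- negative case: A's odd-exponent loop equals the largest odd divisor of B's exponent
theorem neg_case {n m : Int} (hm : 2 ≤ m) (hn : n = -m) :
    loopNeg n m
      (if PySem.Int.mod ((Nat.log 2 m.toNat : Int) + 1) 2 ≠ 0 then (Nat.log 2 m.toNat : Int) + 1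
       else (Nat.log 2 m.toNat : Int) + 1 - 1) = oddPart (findBase m 2) := by
  set L : Int := (Nat.log 2 m.toNat : Int) + 1 with hL
  have hL1 : 1 ≤ L := by omega
  have hmod := PySem.Int.mod_eq_emod_of_pos (a := L) (show (0:Int) < 2 by omega)
  set start : Int := if PySem.Int.mod L 2 ≠ 0 then L else L - 1 with hs
  have hstart : Odd start ∧ L - 1 ≤ start ∧ start ≤ L := by
    rw [hs]
    split_ifs with hpar
    · rw [hmod] at hpar
      exact ⟨⟨L / 2, by omega⟩, by omega, le_rfl⟩
    · rw [hmod] at hpar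
      rw [not_not] at hpar
      exact ⟨⟨L / 2 - 1, by omega⟩, by omega, by omega⟩
  obtain ⟨hso, hsl, hsu⟩ := hstart
  by_cases hex : ∃ b : Int, BaseP m b
  · obtain ⟨b0, hP, hmin⟩ := exists_min_base hex
    obtain ⟨k, hk1, hb0k, hfb⟩ := findBase_finds m 2 le_rfl b0 hP hP.1
      (fun c h1 h2 => hmin c h1 h2)
    obtain ⟨hog1, hogodd, hogdvd, hoggr⟩ := oddPart_spec (k : Int) (by exact_mod_cast hk1)
    set og : Int := oddPart (k : Int) with hogdef
    -- every exponent of a root of m divides k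
    have hdvd : ∀ a : Int, 2 ≤ a → RootP m a.toNat → a ∣ (k : Int) := by
      intro a ha2 hr
      obtain ⟨X, hX1, hXk⟩ := rootP_toNat hm hr
      have hB0 : b0.toNat ^ k = m.toNat := by
        have hb02 := hP.1
        have hcast : ((b0.toNat : ℕ) : Int) = b0 := by omega
        have : ((b0.toNat ^ k : ℕ) : Int) = m := by push_cast [hcast]; exact hb0k
        omega
      have := nat_exp_dvd m.toNat k a.toNat b0.toNat X (by omega) hk1 (by omega) hB0 hXk
        (max_exponent_nat hm hP hmin k hk1 hb0k)
      have hcast : ((a.toNat : ℕ) : Int) = a := by omega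
      rw [← hcast]
      exact_mod_cast this
    have hklog : k ≤ Nat.log 2 m.toNat := by
      have h2k : (2:Int) ^ k ≤ m := by
        calc (2:Int) ^ k ≤ b0 ^ k := pow_le_pow_left₀ (by omega) hP.1 k
        _ = m := hb0k
      have h2kN : 2 ^ k ≤ m.toNat := by
        have : ((2 ^ k : ℕ) : Int) ≤ m := by push_cast; exact h2k
        omega
      exact (Nat.le_log_iff_pow_le (by omega) (by omega)).mpr h2kN
    have hogk : og ≤ (k : Int) := Int.le_of_dvd (by exact_mod_cast hk1) hogdvd
    -- no odd exponent above og carries a root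
    have hno : ∀ a : Int, og < a → a ≤ start → Odd a → ¬ RootP m a.toNat := by
      intro a h1 h2 ho hr
      have ha2 : 2 ≤ a := by
        rcases ho with ⟨j, hj⟩; rcases hogodd with ⟨i, hi⟩; omega
      have := Int.le_of_dvd (by omega) (hoggr a ho (hdvd a ha2 hr))
      omega
    rw [hfb]
    rcases hogodd with ⟨i, hi⟩
    have hogodd' : Odd og := ⟨i, hi⟩
    by_cases hog3 : og = 1
    · rw [← hogdef, hog3]
      refine loopNeg_none n m hm start hso ?_
      intro a h2 hsle ho
      exact hno a (by omega) hsle ho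
    · -- og ≥ 3: it is the largest odd exponent
      have hog3' : 3 ≤ og := by omega
      have hroot : RootP m og.toNat := by
        have hOk : og.toNat ∣ k := by
          have hcast : ((og.toNat : ℕ) : Int) = og := by omega
          have : ((og.toNat : ℕ) : Int) ∣ ((k : ℕ) : Int) := by rw [hcast]; exact hogdvd
          exact_mod_cast this
        have hb02 := hP.1
        refine ⟨b0 ^ (k / og.toNat),
          by have := pow_pos (show (0:Int) < b0 by omega) (k / og.toNat); omega, ?_⟩
        rw [← pow_mul, Nat.div_mul_cancel hOk]
        exact hb0k
      exact loopNeg_finds n m hm hn start hso og hogodd' (by omega) (by omega) hroot hno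
  · rw [findBase_none m 2 le_rfl fun c _ hc => hex ⟨c, hc⟩, oddPart_one]
    refine loopNeg_none n m hm start hso ?_
    intro a h2 hsle ho hr
    obtain ⟨x, hx2, hxx, hxk⟩ := rootP_base hm (k := a.toNat) (by omega) hr
    exact hex ⟨x, hx2, hxx, a.toNat, by omega, hxk⟩

-- ===== VERDICT (by name: the statement is the Claim_ definition above) =====
theorem pth_power_spec : Claim_equal_pth_power := by
  intro n _ hpre
  unfold Spec_pth_power
  unfold Pre_pth_power at hpre
  by_cases h1 : n = 1
  · subst h1
    simp [pth_power, pth_power_alt, findBase]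
  · by_cases h2 : n = -1
    · subst h2
      have hA : pth_power (-1) = 1 := by rw [pth_power]; norm_num
      have hFB : findBase 1 2 = 1 := by rw [findBase]; norm_num
      have hB : pth_power_alt (-1) = 1 := by
        rw [pth_power_alt]
        norm_num [hFB, oddPart_one]
      rw [hA, hB]
    · by_cases h3 : n < 0
      · -- n ≤ -2
        have hm : 2 ≤ -n := by omega
        have hA : pth_power n = loopNeg n (-n)
            (if PySem.Int.mod ((Nat.log 2 (-n).toNat : Int) + 1) 2 ≠ 0
             then (Nat.log 2 (-n).toNat : Int) + 1
             else (Nat.log 2 (-n).toNat : Int) + 1 - 1) := by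
          rw [pth_power]
          rw [if_neg h1, if_neg h2]
          simp only [abs_of_neg h3, if_pos h3]
        have hB : pth_power_alt n = oddPart (findBase (-n) 2) := by
          rw [pth_power_alt]
          simp only [abs_of_neg h3, if_pos h3]
        rw [hA, hB]
        exact neg_case hm (by ring)
      · -- n ≥ 2
        have hm : 2 ≤ n := by omega
        have hA : pth_power n = loopPos n ((Nat.log 2 n.toNat : Int) + 1) := by
          rw [pth_power]
          rw [if_neg h1, if_neg h2]
          simp only [abs_of_nonneg (by omega : (0:Int) ≤ n), if_neg h3]
        have hB : pth_power_alt n = findBase n 2 := by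
          rw [pth_power_alt]
          simp only [abs_of_nonneg (by omega : (0:Int) ≤ n), if_neg h3]
        rw [hA, hB]
        exact pos_case hm
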